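-- pv_equiv track=rewrite | github.com/smcmfmf/MiniProject | MiniProject/main.py | get_train_test_data
-- ===== SOURCE A (Python) =====
-- def get_train_test_data(file_list, train_name):
--     train_data = []
--     test_data = []
--
--     for filename in file_list:
--         matched = False
--         for i in train_name:
--             if str(i) in filename:
--                 train_data.append(filename)
--                 matched = True
--                 break
--         if not matched:
--             test_data.append(filename)
--     return train_data, test_data
-- ===== SOURCE B (Python) =====
-- def get_train_test_data(file_list, train_name):
--     # Worklist algorithm: pattern-major rounds over a shrinking pending list.
--     # Each round removes the files containing the current pattern, so a file is
--     # rescanned only until its first match; matched files are collected per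
--     # round and file order is restored with one index sort at the end.
--     pending = list(enumerate(file_list))
--     matched = []
--     for p in train_name:
--         pat = str(p)
--         still = []
--         for item in pending:
--             (matched if pat in item[1] else still).append(item)
--         pending = still
--     matched.sort(key=lambda t: t[0])
--     train_data = [f for i, f in matched]
--     test_data = [f for i, f in pending]
--     return train_data, test_data
-- ===== Notes on version B (the rewrite author's own statement) =====
-- stated objective: alternative
-- what changed: Replaces A's file-major scan with an inner break by a pattern-major worklist: each pattern round filters a shrinking pending list of (index, file) pairs, matched files are collected per round, and one index sort at the end restores file order; correct because the split depends only on whether any pattern matches and the indices identify the original order.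
import Mathlib
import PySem

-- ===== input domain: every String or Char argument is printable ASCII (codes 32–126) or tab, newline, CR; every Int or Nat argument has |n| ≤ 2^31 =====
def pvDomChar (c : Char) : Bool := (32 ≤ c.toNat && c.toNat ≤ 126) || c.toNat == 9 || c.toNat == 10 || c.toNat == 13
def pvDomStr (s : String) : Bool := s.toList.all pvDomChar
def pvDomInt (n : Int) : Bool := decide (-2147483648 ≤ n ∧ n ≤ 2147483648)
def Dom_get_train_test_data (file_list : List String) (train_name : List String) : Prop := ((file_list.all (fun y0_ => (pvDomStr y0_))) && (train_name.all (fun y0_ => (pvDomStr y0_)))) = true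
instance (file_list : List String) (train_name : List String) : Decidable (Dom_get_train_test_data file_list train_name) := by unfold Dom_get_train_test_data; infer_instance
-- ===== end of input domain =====

-- B is a pattern-major worklist algorithm (shrinking pending list per round, one index sort
-- to restore order) instead of A's file-major scan with an inner break; return value proven equal.
-- ===== PORT A =====
-- inner 'for i in train_name: if str(i) in filename: append; matched = True; break'
def pvInnerA (filename : String) (train_data : List String) : List String → List String × Bool
  | [] => (train_data, false)
  | i :: rest =>
      if PySem.Str.isIn i filename then (train_data ++ [filename], true)
      else pvInnerA filename train_data rest

-- one iteration of A's outer loop over file_list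
def pvStepA (train_name : List String) (acc : List String × List String) (filename : String) :
    List String × List String :=
  let r := pvInnerA filename acc.1 train_name
  if r.2 then (r.1, acc.2) else (r.1, acc.2 ++ [filename])

def get_train_test_data (file_list : List String) (train_name : List String) : List String × List String :=
  file_list.foldl (pvStepA train_name) ([], [])

-- ===== PORT B =====
-- '(matched if pat in item[1] else still).append(item)'; acc = (matched, still)
def pvRound (pat : String) (acc : List (Int × String) × List (Int × String)) (item : Int × String) :
    List (Int × String) × List (Int × String) :=
  if PySem.Str.isIn pat item.2 then (acc.1 ++ [item], acc.2) else (acc.1, acc.2 ++ [item])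

-- one pattern round over pending; state = (pending, matched)
def pvPatStep (st : List (Int × String) × List (Int × String)) (pat : String) :
    List (Int × String) × List (Int × String) :=
  let r := st.1.foldl (pvRound pat) (st.2, [])
  (r.2, r.1)

def get_train_test_data_alt (file_list : List String) (train_name : List String) : List String × List String :=
  let st := train_name.foldl pvPatStep (PySem.List.enumerate file_list, [])
  let m := PySem.List.sorted st.2 (fun t => t.1) false
  (m.map (fun t => t.2), st.1.map (fun t => t.2))

-- ===== PRECONDITION & SPEC =====
def Spec_get_train_test_data (file_list : List String) (train_name : List String) (out : List String × List String) : Prop := out = get_train_test_data_alt file_list train_name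
instance (file_list : List String) (train_name : List String) (out : List String × List String) : Decidable (Spec_get_train_test_data file_list train_name out) := by unfold Spec_get_train_test_data; infer_instance

-- ===== CLAIM (what is proved, stated in full; the proofs are below) =====
def Claim_equal_get_train_test_data : Prop := ∀ (file_list : List String) (train_name : List String), Dom_get_train_test_data file_list train_name → Spec_get_train_test_data file_list train_name (get_train_test_data file_list train_name)

-- ===== LEMMAS AND PROOFS =====
def pvIsTrain (train_name : List String) (filename : String) : Bool :=
  train_name.any (fun p => PySem.Str.isIn p filename)

-- A-side characterisation
theorem pvInnerA_eq (filename : String) (td : List String) (tn : List String) :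
    pvInnerA filename td tn =
      (if pvIsTrain tn filename then td ++ [filename] else td, pvIsTrain tn filename) := by
  induction tn with
  | nil => rfl
  | cons i rest ih =>
      have hc : pvIsTrain (i :: rest) filename
          = (PySem.Str.isIn i filename || pvIsTrain rest filename) := rfl
      cases h : PySem.Str.isIn i filename
      · simp only [pvInnerA, h, ih, hc, Bool.false_or, Bool.false_eq_true, if_false]
      · simp only [pvInnerA, h, hc, Bool.true_or, if_true]

theorem pvStepA_eq (tn : List String) (t s : List String) (f : String) :
    pvStepA tn (t, s) f = if pvIsTrain tn f then (t ++ [f], s) else (t, s ++ [f]) := by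
  rw [pvStepA, pvInnerA_eq]
  cases h : pvIsTrain tn f <;> simp

theorem pvA_foldl_eq (tn : List String) (fl : List String) (t s : List String) :
    fl.foldl (pvStepA tn) (t, s) =
    (t ++ fl.filter (fun f => pvIsTrain tn f),
     s ++ fl.filter (fun f => ¬ pvIsTrain tn f = true)) := by
  induction fl generalizing t s with
  | nil => simp
  | cons f rest ih =>
      rw [List.foldl_cons, pvStepA_eq]
      cases h : pvIsTrain tn f
      · simp [h, ih]
      · simp [h, ih]

-- B-side: one round splits pending into matched-appends and still
theorem pvRound_foldl (pat : String) (l : List (Int × String)) (m s : List (Int × String)) :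
    l.foldl (pvRound pat) (m, s) =
      (m ++ l.filter (fun x => PySem.Str.isIn pat x.2),
       s ++ l.filter (fun x => ¬ PySem.Str.isIn pat x.2 = true)) := by
  induction l generalizing m s with
  | nil => simp
  | cons x rest ih =>
      rw [List.foldl_cons, pvRound]
      cases h : PySem.Str.isIn pat x.2 <;>
        · simp only [PySem.Str.isIn] at h
          simp [h, ih]

-- splitting a filter by a first predicate is a permutation of the disjunction filter
theorem pvFilter_split (f g : (Int × String) → Bool) (l : List (Int × String)) :
    (l.filter f ++ (l.filter (fun x => ¬ f x = true)).filter g).Perm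
      (l.filter (fun x => f x || g x)) := by
  induction l with
  | nil => simp
  | cons x rest ih =>
      cases hf : f x
      · cases hg : g x
        · simpa [hf, hg] using ih
        · simp only [List.filter_cons, hf, hg, Bool.false_eq_true, not_false_eq_true,
            decide_true, Bool.false_or, if_true, if_false]
          exact List.perm_middle.trans (List.Perm.cons x ih)
      · simpa [hf] using List.Perm.cons x ih

-- the whole pattern fold: pending is the unmatched filter, matched a permutation of the matched filter
theorem pvPat_foldl (tn : List String) (l m : List (Int × String)) :
    (tn.foldl pvPatStep (l, m)).1 = l.filter (fun x => ¬ pvIsTrain tn x.2 = true) ∧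
    (tn.foldl pvPatStep (l, m)).2.Perm (m ++ l.filter (fun x => pvIsTrain tn x.2)) := by
  induction tn generalizing l m with
  | nil => simp [pvIsTrain]
  | cons p rest ih =>
      rw [List.foldl_cons]
      have hstep : pvPatStep (l, m) p =
          (l.filter (fun x => ¬ PySem.Str.isIn p x.2 = true),
           m ++ l.filter (fun x => PySem.Str.isIn p x.2)) := by
        rw [pvPatStep, pvRound_foldl]; simp
      rw [hstep]
      obtain ⟨h1, h2⟩ := ih (l.filter (fun x => ¬ PySem.Str.isIn p x.2 = true))
        (m ++ l.filter (fun x => PySem.Str.isIn p x.2))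
      have hor : ∀ x : Int × String,
          pvIsTrain (p :: rest) x.2 = (PySem.Str.isIn p x.2 || pvIsTrain rest x.2) :=
        fun x => rfl
      constructor
      · rw [h1, List.filter_filter]
        apply List.filter_congr
        intro x _
        rw [hor x]
        cases PySem.Str.isIn p x.2 <;> cases pvIsTrain rest x.2 <;> simp
      · refine h2.trans ?_
        rw [List.append_assoc]
        apply List.Perm.append_left m
        have := pvFilter_split (fun x => PySem.Str.isIn p x.2) (fun x => pvIsTrain rest x.2) l
        refine this.trans ?_
        apply List.Perm.of_eq
        apply List.filter_congr
        intro x _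
        rw [hor x]

-- mapping snd over a filter-by-snd of enumerate recovers the filter of the list
theorem pvEnum_filter_map (q : String → Bool) (fl : List String) (s : Int) :
    ((PySem.List.enumerate fl s).filter (fun x => q x.2)).map (fun t => t.2) = fl.filter q := by
  induction fl generalizing s with
  | nil => rfl
  | cons f rest ih =>
      rw [PySem.List.enumerate_cons, List.filter_cons]
      cases h : q f
      · simpa [h] using ih (s + 1)
      · simpa [h] using ih (s + 1)

-- the matched list, sorted by index, IS the matched filter of enumerate
theorem pvSorted_matched (tn : List String) (fl : List String) :
    PySem.List.sorted ((tn.foldl pvPatStep (PySem.List.enumerate fl, [])).2)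
        (fun t => t.1) false
      = (PySem.List.enumerate fl).filter (fun x => pvIsTrain tn x.2) := by
  apply PySem.List.sorted_eq_of_perm_of_pairwise_lt
  · have h := (pvPat_foldl tn (PySem.List.enumerate fl) []).2
    simpa using h.symm
  · exact List.Pairwise.filter _ (PySem.List.pairwise_lt_enumerate fl 0)

-- ===== VERDICT (by name: the statement is the Claim_ definition above) =====
theorem get_train_test_data_spec : Claim_equal_get_train_test_data := by
  intro fl tn _
  unfold Spec_get_train_test_data get_train_test_data get_train_test_data_alt
  rw [pvA_foldl_eq]
  have hp := (pvPat_foldl tn (PySem.List.enumerate fl) []).1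
  simp only [pvSorted_matched, hp, pvEnum_filter_map]
  simp
  exact (pvEnum_filter_map (fun f => !pvIsTrain tn f) fl 0).symm
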